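-- pv_equiv track=rewrite | github.com/carl0sfelipe/BTC-Daytrade-Tycoon | _bmad/scripts/resolve_customization.py | has_identifier_key
-- ===== SOURCE A (Python) =====
-- def has_identifier_key(arr):
--     """Check if array of tables has a consistent identifier key (code or id)."""
--     if not arr or not isinstance(arr, list):
--         return None
--     if not all(isinstance(item, dict) for item in arr):
--         return None
--     codes = ["code" in item for item in arr]
--     ids = ["id" in item for item in arr]
--     if all(codes) and not any(ids):
--         return "code"
--     if all(ids) and not any(codes):
--         return "id"
--     return None
-- ===== SOURCE B (Python) =====
-- def has_identifier_key(arr):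
--     """Check if array of tables has a consistent identifier key (code or id)."""
--     if not arr or not isinstance(arr, list):
--         return None
--
--     def tag(item):
--         # classify one table: which identifier key it carries *exclusively*
--         if not isinstance(item, dict):
--             return None
--         has_code = "code" in item
--         has_id = "id" in item
--         if has_code and not has_id:
--             return "code"
--         if has_id and not has_code:
--             return "id"
--         return "mixed"  # both keys or neither
--
--     first = tag(arr[0])
--     if first not in ("code", "id"):
--         return None
--     for item in arr[1:]:
--         if tag(item) != first:
--             return None
--     return first
-- ===== Notes on version B (the rewrite author's own statement) =====
-- stated objective: alternative
-- what changed: Instead of building two boolean lists and combining four all/any scans, B classifies each item once into a tag ('code'/'id'/'mixed') and returns the first item's tag iff it is a pure identifier tag and every remaining item gets the same tag, exiting early at the first mismatch.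
import Mathlib
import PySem

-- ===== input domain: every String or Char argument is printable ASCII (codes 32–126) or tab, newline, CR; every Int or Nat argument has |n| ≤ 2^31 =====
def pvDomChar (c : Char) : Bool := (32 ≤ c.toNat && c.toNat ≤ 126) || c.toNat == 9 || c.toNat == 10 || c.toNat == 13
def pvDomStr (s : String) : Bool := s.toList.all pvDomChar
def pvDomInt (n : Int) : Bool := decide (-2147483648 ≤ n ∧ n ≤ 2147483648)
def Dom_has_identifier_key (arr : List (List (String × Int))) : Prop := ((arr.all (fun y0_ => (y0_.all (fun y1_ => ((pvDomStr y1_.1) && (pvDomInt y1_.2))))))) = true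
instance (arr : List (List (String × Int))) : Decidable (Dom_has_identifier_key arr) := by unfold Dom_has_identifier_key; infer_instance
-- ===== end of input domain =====

-- B classifies each item once into a tag and checks all items share the first item's pure tag (objective: alternative decomposition).

-- ===== PORT A =====
-- "k in item" for a dict item: some key of the association list equals k
def pvHasKeyA (item : List (String × Int)) (k : String) : Bool :=
  item.any (fun p => p.1 == k)

def has_identifier_key (arr : List (List (String × Int))) : Option String :=
  if arr = [] then none   -- "if not arr … return None" (isinstance guards are vacuous under the type)
  else
    let codes := arr.map (fun item => pvHasKeyA item "code")
    let ids := arr.map (fun item => pvHasKeyA item "id")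
    if codes.all id && !(ids.any id) then some "code"
    else if ids.all id && !(codes.any id) then some "id"
    else none

-- ===== PORT B =====
-- classify one table: which identifier key it carries exclusively
def pvTag (item : List (String × Int)) : String :=
  let has_code := item.any (fun p => p.1 == "code")
  let has_id := item.any (fun p => p.1 == "id")
  if has_code && !has_id then "code"
  else if has_id && !has_code then "id"
  else "mixed"

def has_identifier_key_alt (arr : List (List (String × Int))) : Option String :=
  match arr with
  | [] => none
  | x :: rest =>
    let first := pvTag x
    if first ≠ "code" ∧ first ≠ "id" then none
    -- for-loop over arr[1:] with early "return None" on a mismatching tag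
    else if rest.all (fun item => pvTag item == first) then some first
    else none

-- ===== PRECONDITION & SPEC =====
def Spec_has_identifier_key (arr : List (List (String × Int))) (out : Option String) : Prop := out = has_identifier_key_alt arr
instance (arr : List (List (String × Int))) (out : Option String) : Decidable (Spec_has_identifier_key arr out) := by unfold Spec_has_identifier_key; infer_instance

-- ===== CLAIM (what is proved, stated in full; the proofs are below) =====
def Claim_equal_has_identifier_key : Prop := ∀ (arr : List (List (String × Int))), Dom_has_identifier_key arr → Spec_has_identifier_key arr (has_identifier_key arr)

-- ===== LEMMAS AND PROOFS =====

-- pvTag's equality tests, as boolean combinations of the key membership tests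
theorem pvTag_code (x : List (String × Int)) :
    (pvTag x == "code") = ((x.any fun p => p.1 == "code") && !(x.any fun p => p.1 == "id")) := by
  cases hc : x.any (fun p => p.1 == "code") <;> cases hi : x.any (fun p => p.1 == "id") <;>
    simp [pvTag, hc, hi]

theorem pvTag_id (x : List (String × Int)) :
    (pvTag x == "id") = ((x.any fun p => p.1 == "id") && !(x.any fun p => p.1 == "code")) := by
  cases hc : x.any (fun p => p.1 == "code") <;> cases hi : x.any (fun p => p.1 == "id") <;>
    simp [pvTag, hc, hi]

-- A's "every item has k and none has the other k'" equals "every item tags as k"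
theorem pv_code_iff (arr : List (List (String × Int))) :
    ((arr.map (fun item => pvHasKeyA item "code")).all id
      && !((arr.map (fun item => pvHasKeyA item "id")).any id))
    = arr.all (fun item => pvTag item == "code") := by
  induction arr with
  | nil => rfl
  | cons x xs ih =>
    have ih' : ((xs.all fun item => item.any fun p => p.1 == "code")
        && !(xs.any fun item => item.any fun p => p.1 == "id"))
        = xs.all (fun item => (item.any fun p => p.1 == "code") && !(item.any fun p => p.1 == "id")) := by
      simpa [pvHasKeyA, List.all_map, List.any_map, pvTag_code] using ih
    simp only [List.map_cons, List.all_cons, List.any_cons, pvTag_code, pvHasKeyA, Bool.not_or]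
    cases x.any (fun p => p.1 == "code") <;> cases x.any (fun p => p.1 == "id") <;> simp [ih']

theorem pv_id_iff (arr : List (List (String × Int))) :
    ((arr.map (fun item => pvHasKeyA item "id")).all id
      && !((arr.map (fun item => pvHasKeyA item "code")).any id))
    = arr.all (fun item => pvTag item == "id") := by
  induction arr with
  | nil => rfl
  | cons x xs ih =>
    have ih' : ((xs.all fun item => item.any fun p => p.1 == "id")
        && !(xs.any fun item => item.any fun p => p.1 == "code"))
        = xs.all (fun item => (item.any fun p => p.1 == "id") && !(item.any fun p => p.1 == "code")) := by
      simpa [pvHasKeyA, List.all_map, List.any_map, pvTag_id] using ih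
    simp only [List.map_cons, List.all_cons, List.any_cons, pvTag_id, pvHasKeyA, Bool.not_or]
    cases x.any (fun p => p.1 == "id") <;> cases x.any (fun p => p.1 == "code") <;> simp [ih']

-- ===== VERDICT (by name: the statement is the Claim_ definition above) =====
theorem has_identifier_key_spec : Claim_equal_has_identifier_key := by
  intro arr _
  unfold Spec_has_identifier_key
  match arr with
  | [] => rfl
  | x :: rest =>
    unfold has_identifier_key has_identifier_key_alt
    simp only [reduceCtorEq, if_false]
    rw [pv_code_iff, pv_id_iff]
    simp only [List.all_cons, Bool.and_eq_true, beq_iff_eq]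
    by_cases hx : pvTag x = "code"
    · simp [hx]
    · by_cases hx2 : pvTag x = "id"
      · have : ¬ (pvTag x = "code" ∧ rest.all (fun item => pvTag item == pvTag x) = true) := by
          simp [hx]
        simp [hx2]
      · simp [hx, hx2]
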